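-- pv_equiv track=rewrite | github.com/yurka239/procurement-classifier | src/normalizer.py | _select_canonical
-- ===== SOURCE A (Python) =====
-- from typing import Dict, List, Set, Tuple, Optional
-- from collections import Counter, defaultdict
--
-- def _select_canonical(cluster: List[str], counts: Counter) -> str:
--     """
--     Select the best canonical form from a cluster.
--
--     Priority:
--     1. Most frequent
--     2. If tie: lowercase version
--     3. If tie: shortest
--     """
--     if not cluster:
--         return ""
--
--     if len(cluster) == 1:
--         return cluster[0].lower()
--
--     # Score each candidate
--     scored = []
--     for value in cluster:
--         freq = counts.get(value, 0)
--         is_lower = value == value.lower()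
--         length = len(value)
--         # Higher frequency is better, lowercase preferred, shorter preferred
--         score = (freq * 1000, is_lower, -length)
--         scored.append((score, value))
--
--     # Sort by score (descending)
--     scored.sort(key=lambda x: x[0], reverse=True)
--
--     # Return canonical in lowercase
--     return scored[0][1].lower()
-- ===== SOURCE B (Python) =====
-- def _select_canonical(cluster, counts):
--     if not cluster:
--         return ""
--     maxfreq = max(counts.get(v, 0) for v in cluster)
--     cands = [v for v in cluster if counts.get(v, 0) == maxfreq]
--     lower = [v for v in cands if v == v.lower()]
--     if lower:
--         cands = lower
--     return min(cands, key=len).lower()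
-- ===== Notes on version B (the rewrite author's own statement) =====
-- stated objective: simpler
-- what changed: Replaced the build-score-tuples-then-stable-sort pipeline with successive elimination rounds (keep max-frequency candidates, narrow to lowercase ones if any exist, take the first shortest), with no score tuples, no *1000 scaling and no sort.
import Mathlib
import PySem

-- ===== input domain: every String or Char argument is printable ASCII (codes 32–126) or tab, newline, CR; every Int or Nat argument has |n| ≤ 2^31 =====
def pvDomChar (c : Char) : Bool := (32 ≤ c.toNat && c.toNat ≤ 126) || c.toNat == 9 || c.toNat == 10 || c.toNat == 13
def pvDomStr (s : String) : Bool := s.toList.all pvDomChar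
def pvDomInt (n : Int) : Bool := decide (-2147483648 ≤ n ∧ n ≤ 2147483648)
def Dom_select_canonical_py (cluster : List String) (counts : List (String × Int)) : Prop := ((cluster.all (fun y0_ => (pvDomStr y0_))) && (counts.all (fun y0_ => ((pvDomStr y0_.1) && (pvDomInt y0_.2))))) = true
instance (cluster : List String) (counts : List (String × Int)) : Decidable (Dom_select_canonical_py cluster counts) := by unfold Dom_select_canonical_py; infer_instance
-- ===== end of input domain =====

-- B replaces the score-tuple-plus-stable-sort with successive elimination rounds
-- (max-frequency candidates, then lowercase ones if any, then first-shortest): simpler, no sort.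

-- ===== PORT A =====
-- literal transliteration of _select_canonical; the Python score tuple (freq*1000, is_lower, -length)
-- is compared lexicographically, so its type here is Lex (Int × Lex (Bool × Int)) (False < True on Bool, as in Python)
def select_canonical_py (cluster : List String) (counts : List (String × Int)) : String :=
  if cluster = [] then ""                                      -- if not cluster: return ""
  else if cluster.length = 1 then
    PySem.Str.lower ((PySem.List.pyGet? cluster 0).getD "")    -- return cluster[0].lower()  (.getD "" unreachable: cluster nonempty)
  else
    let scored := cluster.foldl (fun acc value =>
      let freq := PySem.Dict.getD (PySem.Dict.mk counts) value 0
      let is_lower : Bool := value == PySem.Str.lower value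
      let length := PySem.Str.len value
      acc ++ [((toLex (freq * 1000, toLex (is_lower, -length)) : Lex (Int × Lex (Bool × Int))), value)]) []
    match PySem.List.sorted scored (fun x => x.1) true with    -- scored.sort(key=lambda x: x[0], reverse=True)
    | (_, v) :: _ => PySem.Str.lower v                         -- return scored[0][1].lower()
    | [] => ""                                                 -- unreachable: scored nonempty

-- ===== PORT B =====
-- transliteration of Source B: elimination rounds, no tuples, no sort
def select_canonical_py_alt (cluster : List String) (counts : List (String × Int)) : String :=
  match cluster with
  | [] => ""                                                  -- if not cluster: return ""
  | _ :: _ =>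
    let maxfreq := (PySem.List.max? (cluster.map (fun v => PySem.Dict.getD (PySem.Dict.mk counts) v 0)) (fun x => x)).getD 0
    let cands := cluster.filter (fun v => PySem.Dict.getD (PySem.Dict.mk counts) v 0 == maxfreq)
    let lowers := cands.filter (fun v => v == PySem.Str.lower v)
    let cands2 := if lowers.isEmpty then cands else lowers    -- if lower: cands = lower
    match PySem.List.min? cands2 (fun v => PySem.Str.len v) with   -- min(cands, key=len)
    | some m => PySem.Str.lower m
    | none => ""                                              -- unreachable: cands2 nonempty

-- ===== PRECONDITION & SPEC =====
def Spec_select_canonical_py (cluster : List String) (counts : List (String × Int)) (out : String) : Prop := out = select_canonical_py_alt cluster counts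
instance (cluster : List String) (counts : List (String × Int)) (out : String) : Decidable (Spec_select_canonical_py cluster counts out) := by unfold Spec_select_canonical_py; infer_instance

-- ===== CLAIM (what is proved, stated in full; the proofs are below) =====
def Claim_equal_select_canonical_py : Prop := ∀ (cluster : List String) (counts : List (String × Int)), Dom_select_canonical_py cluster counts → Spec_select_canonical_py cluster counts (select_canonical_py cluster counts)

-- ===== LEMMAS AND PROOFS =====

-- the comparison key both programs select by (A explicitly, B round by round)
def pvK (counts : List (String × Int)) (v : String) : Lex (Int × Lex (Bool × Int)) :=
  toLex (PySem.Dict.getD (PySem.Dict.mk counts) v 0 * 1000,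
         toLex ((v == PySem.Str.lower v), -(PySem.Str.len v)))

lemma head?_insertBy {α : Type} (before : α → α → Bool) (x : α) (ys : List α) :
    (PySem.List.insertBy before x ys).head? =
      (match ys.head? with
       | none => some x
       | some y => if before x y then some x else some y) := by
  cases ys <;> simp [PySem.List.insertBy] <;> split <;> simp_all

lemma head?_foldl_insertBy {α : Type} (before : α → α → Bool) (xs : List α) (acc : List α) :
    (xs.foldl (fun a x => PySem.List.insertBy before x a) acc).head? =
      xs.foldl (fun o x =>
        match o with
        | none => some x
        | some y => if before x y then some x else some y) acc.head? := by
  induction xs generalizing acc with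
  | nil => rfl
  | cons x t ih => simp only [List.foldl_cons]; rw [ih, head?_insertBy]

lemma head?_sorted_rev {α κ : Type} [LinearOrder κ] (xs : List α) (key : α → κ) :
    (PySem.List.sorted xs key true).head? = PySem.List.max? xs key := by
  rw [PySem.List.sorted_rev_eq_foldl_insertBy, head?_foldl_insertBy]
  unfold PySem.List.max?
  apply PySem.List.foldl_congr_mem
  intro acc x _
  cases acc <;> simp

lemma max?_map {α β κ : Type} [LinearOrder κ] (f : α → β) (xs : List α) (key : β → κ) :
    PySem.List.max? (xs.map f) key = Option.map f (PySem.List.max? xs (fun v => key (f v))) := by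
  unfold PySem.List.max?
  rw [List.foldl_map]
  suffices h : ∀ (o : Option α),
      List.foldl (fun acc x =>
        match acc with
        | none => some (f x)
        | some m => if key m < key (f x) then some (f x) else some m) (Option.map f o) xs =
      Option.map f (List.foldl (fun acc x =>
        match acc with
        | none => some x
        | some m => if key (f m) < key (f x) then some x else some m) o xs) from h none
  intro o
  induction xs generalizing o with
  | nil => rfl
  | cons x t ih =>
    simp only [List.foldl_cons]
    rw [← ih]
    congr 1
    cases o with
    | none => rfl
    | some m => simp only [Option.map]; split <;> rfl

lemma max?_first {α κ : Type} [LinearOrder κ] (xs : List α) (key : α → κ) (m : α)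
    (h : PySem.List.max? xs key = some m) :
    (∀ y ∈ xs, key y ≤ key m) ∧
      (xs.filter (fun y => decide (key y = key m))).head? = some m := by
  induction xs using List.reverseRecOn generalizing m with
  | nil => simp [PySem.List.max?] at h
  | append_singleton t y ih =>
    have hstep : PySem.List.max? (t ++ [y]) key =
        (match PySem.List.max? t key with
         | none => some y
         | some m0 => if key m0 < key y then some y else some m0) := by
      unfold PySem.List.max?; rw [List.foldl_append]; rfl
    rw [hstep] at h
    cases ht : PySem.List.max? t key with
    | none =>
      have htnil : t = [] := (PySem.List.max?_eq_none_iff t key).mp ht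
      subst htnil
      rw [ht] at h
      simp only [Option.some.injEq] at h
      subst h
      simp
    | some m0 =>
      rw [ht] at h
      dsimp only at h
      obtain ⟨ihmax, ihhead⟩ := ih m0 ht
      by_cases hlt : key m0 < key y
      · rw [if_pos hlt] at h
        simp only [Option.some.injEq] at h
        subst h
        constructor
        · intro z hz
          rcases List.mem_append.mp hz with hz | hz
          · exact le_of_lt (lt_of_le_of_lt (ihmax z hz) hlt)
          · simp at hz; subst hz; exact le_refl _
        · rw [List.filter_append]
          have hnil : t.filter (fun z => decide (key z = key y)) = [] := by
            rw [List.filter_eq_nil_iff]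
            intro z hz
            have : key z < key y := lt_of_le_of_lt (ihmax z hz) hlt
            simp [ne_of_lt this]
          rw [hnil]
          simp
      · rw [if_neg hlt] at h
        simp only [Option.some.injEq] at h
        subst h
        constructor
        · intro z hz
          rcases List.mem_append.mp hz with hz | hz
          · exact ihmax z hz
          · simp at hz; subst hz; exact le_of_not_gt hlt
        · rw [List.filter_append]
          obtain ⟨l1, hl1⟩ := List.head?_eq_some_iff.mp ihhead
          rw [hl1]
          simp
  
lemma min?_first {α κ : Type} [LinearOrder κ] (xs : List α) (key : α → κ) (m : α)
    (h : PySem.List.min? xs key = some m) :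
    (∀ y ∈ xs, key m ≤ key y) ∧
      (xs.filter (fun y => decide (key y = key m))).head? = some m := by
  induction xs using List.reverseRecOn generalizing m with
  | nil => simp [PySem.List.min?] at h
  | append_singleton t y ih =>
    have hstep : PySem.List.min? (t ++ [y]) key =
        (match PySem.List.min? t key with
         | none => some y
         | some m0 => if key y < key m0 then some y else some m0) := by
      unfold PySem.List.min?; rw [List.foldl_append]; rfl
    rw [hstep] at h
    cases ht : PySem.List.min? t key with
    | none =>
      have htnil : t = [] := by
        have := PySem.List.min?_eq_none_iff (xs := t) (key := key)
        tauto
      subst htnil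
      rw [ht] at h
      simp only [Option.some.injEq] at h
      subst h
      simp
    | some m0 =>
      rw [ht] at h
      dsimp only at h
      obtain ⟨ihmin, ihhead⟩ := ih m0 ht
      by_cases hlt : key y < key m0
      · rw [if_pos hlt] at h
        simp only [Option.some.injEq] at h
        subst h
        constructor
        · intro z hz
          rcases List.mem_append.mp hz with hz | hz
          · exact le_of_lt (lt_of_lt_of_le hlt (ihmin z hz))
          · simp at hz; subst hz; exact le_refl _
        · rw [List.filter_append]
          have hnil : t.filter (fun z => decide (key z = key y)) = [] := by
            rw [List.filter_eq_nil_iff]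
            intro z hz
            have : key y < key z := lt_of_lt_of_le hlt (ihmin z hz)
            simp [(ne_of_lt this).symm]
          rw [hnil]
          simp
      · rw [if_neg hlt] at h
        simp only [Option.some.injEq] at h
        subst h
        constructor
        · intro z hz
          rcases List.mem_append.mp hz with hz | hz
          · exact ihmin z hz
          · simp at hz; subst hz; exact le_of_not_gt hlt
        · rw [List.filter_append]
          obtain ⟨l1, hl1⟩ := List.head?_eq_some_iff.mp ihhead
          rw [hl1]
          simp

-- frequency and lowercase-ness of a candidate (proof-side names for the components of pvK)
def pvF (counts : List (String × Int)) (v : String) : Int := PySem.Dict.getD (PySem.Dict.mk counts) v 0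
def pvL (v : String) : Bool := v == PySem.Str.lower v

lemma pvK_eq_iff (counts : List (String × Int)) (a b : String) :
    pvK counts a = pvK counts b ↔
      (pvF counts a = pvF counts b ∧ pvL a = pvL b ∧ PySem.Str.len a = PySem.Str.len b) := by
  unfold pvK pvF pvL
  rw [toLex_inj, Prod.mk.injEq, toLex_inj, Prod.mk.injEq, neg_inj]
  constructor
  · rintro ⟨h1, h2, h3⟩; exact ⟨by omega, h2, h3⟩
  · rintro ⟨h1, h2, h3⟩; exact ⟨by omega, h2, h3⟩

lemma pvK_le_freq {counts : List (String × Int)} {a b : String}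
    (h : pvK counts a ≤ pvK counts b) : pvF counts a ≤ pvF counts b := by
  unfold pvK at h
  unfold pvF
  rw [Prod.Lex.le_iff] at h
  simp only [ofLex_toLex] at h
  rcases h with h | ⟨h, -⟩ <;> omega

lemma pvK_le_lower {counts : List (String × Int)} {a b : String}
    (hf : pvF counts a = pvF counts b) (h : pvK counts a ≤ pvK counts b) : pvL a ≤ pvL b := by
  unfold pvK at h
  unfold pvF at hf
  rw [Prod.Lex.le_iff] at h
  simp only [ofLex_toLex] at h
  rcases h with h | ⟨-, h2⟩
  · exfalso; omega
  · rw [Prod.Lex.le_iff] at h2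
    simp only [ofLex_toLex] at h2
    unfold pvL
    rcases h2 with h2 | ⟨h2, -⟩
    · exact le_of_lt h2
    · exact le_of_eq h2

lemma pvK_le_intro {counts : List (String × Int)} {a b : String}
    (hf : pvF counts a = pvF counts b) (hl : pvL a = pvL b)
    (hn : PySem.Str.len b ≤ PySem.Str.len a) : pvK counts a ≤ pvK counts b := by
  unfold pvF at hf
  unfold pvL at hl
  unfold pvK
  rw [Prod.Lex.le_iff]
  simp only [ofLex_toLex]
  right
  refine ⟨by omega, ?_⟩
  rw [Prod.Lex.le_iff]
  simp only [ofLex_toLex]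
  right
  exact ⟨hl, by omega⟩

-- the elimination tail: the first shortest element of the surviving candidate list is
-- exactly the first pvK-maximal element of the cluster
lemma last_step (cluster : List String) (counts : List (String × Int)) (m : String)
    (Q : String → Bool)
    (hmem : m ∈ cluster)
    (hmax : ∀ y ∈ cluster, pvK counts y ≤ pvK counts m)
    (hhead : (cluster.filter (fun y => decide (pvK counts y = pvK counts m))).head? = some m)
    (hQ : ∀ y ∈ cluster, (Q y = true ↔ (pvF counts y = pvF counts m ∧ pvL y = pvL m))) :
    PySem.List.min? (cluster.filter Q) (fun v => PySem.Str.len v) = some m := by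
  have hmC : m ∈ cluster.filter Q :=
    List.mem_filter.mpr ⟨hmem, (hQ m hmem).mpr ⟨rfl, rfl⟩⟩
  cases hb : PySem.List.min? (cluster.filter Q) (fun v => PySem.Str.len v) with
  | none =>
    have := (PySem.List.min?_eq_none_iff (xs := cluster.filter Q) (key := fun v => PySem.Str.len v))
    rw [this] at hb
    rw [hb] at hmC
    simp at hmC
  | some b =>
    obtain ⟨hbmin, hbhead⟩ := min?_first _ _ _ hb
    have hbC : b ∈ cluster.filter Q := PySem.List.min?_mem hb
    have hbcl : b ∈ cluster := (List.mem_filter.mp hbC).1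
    obtain ⟨hbf, hbl⟩ := (hQ b hbcl).mp (List.mem_filter.mp hbC).2
    have hKb : pvK counts b = pvK counts m := by
      apply le_antisymm (hmax b hbcl)
      exact pvK_le_intro hbf.symm hbl.symm (hbmin m hmC)
    have hnbm : PySem.Str.len b = PySem.Str.len m := ((pvK_eq_iff counts b m).mp hKb).2.2
    have hfilters : cluster.filter (fun y => decide (pvK counts y = pvK counts m)) =
        (cluster.filter Q).filter (fun y => decide (PySem.Str.len y = PySem.Str.len b)) := by
      rw [List.filter_filter]
      apply List.filter_congr
      intro y hy
      rw [Bool.eq_iff_iff]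
      simp only [decide_eq_true_eq, Bool.and_eq_true, hQ y hy, pvK_eq_iff, hnbm]
      constructor
      · rintro ⟨h1, h2, h3⟩; exact ⟨h3, h1, h2⟩
      · rintro ⟨h3, h1, h2⟩; exact ⟨h1, h2, h3⟩
    rw [hfilters] at hhead
    rw [hbhead] at hhead
    simp only [Option.some.injEq] at hhead
    rw [hhead]

-- A's sort-based selection returns the first pvK-maximal element, lowercased
lemma A_eq (v0 : String) (rest : List String) (counts : List (String × Int)) (m : String)
    (hm : PySem.List.max? (v0 :: rest) (pvK counts) = some m) :
    select_canonical_py (v0 :: rest) counts = PySem.Str.lower m := by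
  cases rest with
  | nil =>
    have : PySem.List.max? [v0] (pvK counts) = some v0 := rfl
    rw [this] at hm
    simp only [Option.some.injEq] at hm
    subst hm
    simp [select_canonical_py, PySem.List.pyGet?, PySem.List.pyIdx?]
  | cons r rs =>
    have hne : (v0 :: r :: rs) ≠ [] := by simp
    have hlen : (v0 :: r :: rs).length ≠ 1 := by simp
    simp only [select_canonical_py, if_neg hne, if_neg hlen]
    rw [PySem.List.foldl_append_singleton_eq_map
      (f := fun value => ((toLex (PySem.Dict.getD (PySem.Dict.mk counts) value 0 * 1000,
        toLex ((value == PySem.Str.lower value), -(PySem.Str.len value))) :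
          Lex (Int × Lex (Bool × Int))), value))]
    have hk : (fun value => ((toLex (PySem.Dict.getD (PySem.Dict.mk counts) value 0 * 1000,
        toLex ((value == PySem.Str.lower value), -(PySem.Str.len value))) :
          Lex (Int × Lex (Bool × Int))), value)) = fun v => (pvK counts v, v) := rfl
    rw [hk]
    have hhd : (PySem.List.sorted ((v0 :: r :: rs).map (fun v => (pvK counts v, v)))
        (fun x => x.1) true).head? = some (pvK counts m, m) := by
      rw [head?_sorted_rev, max?_map (fun v => (pvK counts v, v)) (v0 :: r :: rs) (fun x => x.1)]
      rw [show (fun v => (pvK counts v, v).1) = pvK counts from rfl, hm]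
      rfl
    obtain ⟨tl, htl⟩ := List.head?_eq_some_iff.mp hhd
    rw [List.nil_append, htl]

-- B's elimination rounds also return the first pvK-maximal element, lowercased
lemma B_eq (v0 : String) (rest : List String) (counts : List (String × Int)) (m : String)
    (hm : PySem.List.max? (v0 :: rest) (pvK counts) = some m) :
    select_canonical_py_alt (v0 :: rest) counts = PySem.Str.lower m := by
  have hmem : m ∈ v0 :: rest := PySem.List.max?_mem hm
  have hmax : ∀ y ∈ v0 :: rest, pvK counts y ≤ pvK counts m := PySem.List.max?_isMax hm
  obtain ⟨-, hhead⟩ := max?_first _ _ _ hm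
  cases hmf : PySem.List.max? (v0 :: rest) (fun v => PySem.Dict.getD (PySem.Dict.mk counts) v 0) with
  | none =>
    rw [PySem.List.max?_eq_none_iff] at hmf
    exact absurd hmf (by simp)
  | some mf =>
  have hmap := max?_map (fun v => PySem.Dict.getD (PySem.Dict.mk counts) v 0) (v0 :: rest)
    (fun x => (x : Int))
  rw [show (fun v => ((fun x => (x : Int)) ((fun v => PySem.Dict.getD (PySem.Dict.mk counts) v 0) v))) =
      (fun v => PySem.Dict.getD (PySem.Dict.mk counts) v 0) from rfl, hmf] at hmap
  simp only [Option.map_some] at hmap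
  have hfm : pvF counts mf = pvF counts m := by
    apply le_antisymm
    · exact pvK_le_freq (hmax mf (PySem.List.max?_mem hmf))
    · exact PySem.List.max?_isMax hmf m hmem
  simp only [select_canonical_py_alt]
  rw [hmap]
  simp only [Option.getD_some]
  by_cases hlow : ((v0 :: rest).filter
      (fun v => PySem.Dict.getD (PySem.Dict.mk counts) v 0 == PySem.Dict.getD (PySem.Dict.mk counts) mf 0)).filter
      (fun v => v == PySem.Str.lower v) = []
  · -- no lowercase candidate survives: cands2 = cands
    rw [hlow]
    simp only [List.isEmpty_nil, if_pos]
    have hLm : pvL m = false := by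
      have hmC : m ∈ (v0 :: rest).filter
          (fun v => PySem.Dict.getD (PySem.Dict.mk counts) v 0 == PySem.Dict.getD (PySem.Dict.mk counts) mf 0) := by
        apply List.mem_filter.mpr
        refine ⟨hmem, ?_⟩
        simpa [beq_iff_eq] using hfm.symm
      have := List.filter_eq_nil_iff.mp hlow m hmC
      unfold pvL
      simpa using this
    have hres := last_step (v0 :: rest) counts m
      (fun v => PySem.Dict.getD (PySem.Dict.mk counts) v 0 == PySem.Dict.getD (PySem.Dict.mk counts) mf 0)
      hmem hmax hhead ?_
    · rw [hres]
    · intro y hy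
      simp only [beq_iff_eq]
      constructor
      · intro h
        have hyC : y ∈ (v0 :: rest).filter
            (fun v => PySem.Dict.getD (PySem.Dict.mk counts) v 0 == PySem.Dict.getD (PySem.Dict.mk counts) mf 0) := by
          apply List.mem_filter.mpr
          exact ⟨hy, by simpa [beq_iff_eq] using h⟩
        have hLy : pvL y = false := by
          have := List.filter_eq_nil_iff.mp hlow y hyC
          unfold pvL
          simpa using this
        refine ⟨?_, by rw [hLy, hLm]⟩
        unfold pvF
        rw [h]
        exact hfm
      · rintro ⟨h1, -⟩
        have : pvF counts y = pvF counts mf := h1.trans hfm.symm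
        exact this
  · -- some lowercase candidate survives: cands2 = lowers
    have hlowb : (((v0 :: rest).filter
        (fun v => PySem.Dict.getD (PySem.Dict.mk counts) v 0 == PySem.Dict.getD (PySem.Dict.mk counts) mf 0)).filter
        (fun v => v == PySem.Str.lower v)).isEmpty = false := by
      cases h : (((v0 :: rest).filter
        (fun v => PySem.Dict.getD (PySem.Dict.mk counts) v 0 == PySem.Dict.getD (PySem.Dict.mk counts) mf 0)).filter
        (fun v => v == PySem.Str.lower v)).isEmpty
      · rfl
      · exact absurd (List.isEmpty_iff.mp h) hlow
    rw [hlowb, if_neg Bool.false_ne_true]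
    obtain ⟨w, hwmem⟩ := List.exists_mem_of_ne_nil _ hlow
    have hwC := List.mem_filter.mp hwmem
    have hwcl : w ∈ v0 :: rest := (List.mem_filter.mp hwC.1).1
    have hwf : pvF counts w = pvF counts mf := by
      have := (List.mem_filter.mp hwC.1).2
      unfold pvF
      simpa [beq_iff_eq] using this
    have hLw : pvL w = true := by unfold pvL; simpa using hwC.2
    have hLm : pvL m = true := by
      have hle : pvL w ≤ pvL m :=
        pvK_le_lower (hwf.trans hfm) (hmax w hwcl)
      rw [hLw] at hle
      exact le_antisymm (Bool.le_true _) hle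
    rw [List.filter_filter]
    have hres := last_step (v0 :: rest) counts m
      (fun v => (v == PySem.Str.lower v) &&
        (PySem.Dict.getD (PySem.Dict.mk counts) v 0 == PySem.Dict.getD (PySem.Dict.mk counts) mf 0))
      hmem hmax hhead ?_
    · rw [hres]
    · intro y hy
      simp only [Bool.and_eq_true, beq_iff_eq]
      constructor
      · rintro ⟨h2, h1⟩
        refine ⟨?_, ?_⟩
        · unfold pvF; rw [h1]; exact hfm
        · rw [hLm]; unfold pvL; simpa using h2
      · rintro ⟨h1, h2⟩
        refine ⟨?_, h1.trans hfm.symm⟩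
        rw [hLm] at h2
        unfold pvL at h2
        simpa using h2

-- ===== VERDICT (by name: the statement is the Claim_ definition above) =====
theorem select_canonical_py_spec : Claim_equal_select_canonical_py := by
  intro cluster counts _
  unfold Spec_select_canonical_py
  cases cluster with
  | nil => rfl
  | cons v0 rest =>
    cases hm : PySem.List.max? (v0 :: rest) (pvK counts) with
    | none =>
      rw [PySem.List.max?_eq_none_iff] at hm
      exact absurd hm (by simp)
    | some m =>
      rw [A_eq v0 rest counts m hm, B_eq v0 rest counts m hm]
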